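-- pv_equiv track=rewrite | github.com/dipenduadhikari13-byte/ai-music-maker | lyrics_harvester.py | _clean_lyrics
-- ===== SOURCE A (Python) =====
-- def _clean_lyrics(text: str) -> str:
--     if not text:
--         return ""
--     lines = text.split("\n")
--     out: list[str] = []
--     prev_blank = False
--     for line in lines:
--         line = line.rstrip()
--         blank = not line
--         if blank and prev_blank:
--             continue
--         out.append(line)
--         prev_blank = blank
--     return "\n".join(out).strip()
-- ===== SOURCE B (Python) =====
-- def _clean_lyrics(text: str) -> str:
--     if not text:
--         return ""
--     paragraphs: list[str] = []
--     para: list[str] = []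
--     for raw in text.split("\n"):
--         line = raw.rstrip()
--         if line:
--             para.append(line)
--         elif para:
--             paragraphs.append("\n".join(para))
--             para = []
--     if para:
--         paragraphs.append("\n".join(para))
--     return "\n\n".join(paragraphs).strip()
-- ===== Notes on version B (the rewrite author's own statement) =====
-- stated objective: alternative
-- what changed: Replaces A's prev_blank state machine that conditionally appends (possibly blank) lines with a paragraph-grouping algorithm: runs of nonblank rstripped lines are collected into paragraphs and the paragraphs are joined with a blank-line separator, so blank lines are never stored and no per-line blank flag exists.
import Mathlib
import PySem

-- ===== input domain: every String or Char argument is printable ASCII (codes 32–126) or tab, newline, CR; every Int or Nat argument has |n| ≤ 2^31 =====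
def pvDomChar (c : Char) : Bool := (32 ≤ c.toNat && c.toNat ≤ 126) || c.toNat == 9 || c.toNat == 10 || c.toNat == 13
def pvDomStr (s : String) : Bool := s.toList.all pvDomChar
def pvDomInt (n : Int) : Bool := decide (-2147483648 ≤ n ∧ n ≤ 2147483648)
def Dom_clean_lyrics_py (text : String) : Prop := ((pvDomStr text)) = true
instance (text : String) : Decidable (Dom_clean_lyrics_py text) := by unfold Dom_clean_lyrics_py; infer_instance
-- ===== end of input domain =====

-- B replaces A's prev_blank state machine (which conditionally appends blank lines)
-- by paragraph grouping: runs of nonblank rstripped lines are collected into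
-- paragraphs and the paragraphs are joined with "\n\n"; same cost, different algorithm.

-- ===== PORT A =====
-- A's for-loop over the lines, carrying (out, prev_blank), as structural recursion
def pvALoop : List (List Char) → List (List Char) → Bool → List (List Char)
  | [], out, _ => out
  | line :: rest, out, prev_blank =>
    let l := PySem.Chars.rstrip line
    let blank := l.isEmpty
    if blank && prev_blank then pvALoop rest out prev_blank
    else pvALoop rest (out ++ [l]) blank

def clean_lyrics_py (text : String) : String :=
  if text = "" then ""
  else
    let lines := PySem.Chars.splitOn text.toList ['\n']
    String.ofList (PySem.Chars.strip (PySem.Chars.join ['\n'] (pvALoop lines [] false)))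

-- ===== PORT B =====
-- Source B's loop, carrying (paragraphs, para): nonblank rstripped lines are appended to
-- the current paragraph; a blank line closes a nonempty paragraph (joined with "\n")
def pvBLoop : List (List Char) → List (List Char) → List (List Char) → List (List Char)
  | [], paragraphs, para =>
    if para.isEmpty then paragraphs
    else paragraphs ++ [PySem.Chars.join ['\n'] para]
  | raw :: rest, paragraphs, para =>
    let line := PySem.Chars.rstrip raw
    if !line.isEmpty then pvBLoop rest paragraphs (para ++ [line])
    else if !para.isEmpty then pvBLoop rest (paragraphs ++ [PySem.Chars.join ['\n'] para]) []
    else pvBLoop rest paragraphs para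

def clean_lyrics_py_alt (text : String) : String :=
  if text = "" then ""
  else
    let paragraphs := pvBLoop (PySem.Chars.splitOn text.toList ['\n']) [] []
    String.ofList (PySem.Chars.strip (PySem.Chars.join ['\n', '\n'] paragraphs))

-- ===== PRECONDITION & SPEC =====
def Spec_clean_lyrics_py (text : String) (out : String) : Prop := out = clean_lyrics_py_alt text
instance (text : String) (out : String) : Decidable (Spec_clean_lyrics_py text out) := by unfold Spec_clean_lyrics_py; infer_instance

-- ===== CLAIM (what is proved, stated in full; the proofs are below) =====
def Claim_equal_clean_lyrics_py : Prop := ∀ (text : String), Dom_clean_lyrics_py text → Spec_clean_lyrics_py text (clean_lyrics_py text)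

-- ===== LEMMAS AND PROOFS =====

-- the list A's loop appends after the already-emitted prefix, on already-rstripped lines
def pvKeep : Bool → List (List Char) → List (List Char)
  | _, [] => []
  | pb, c :: rest => if c.isEmpty && pb then pvKeep pb rest else c :: pvKeep c.isEmpty rest

theorem pvALoop_eq (ls : List (List Char)) :
    ∀ (out : List (List Char)) (pb : Bool),
      pvALoop ls out pb = out ++ pvKeep pb (ls.map PySem.Chars.rstrip) := by
  induction ls with
  | nil => intro out pb; simp [pvALoop, pvKeep]
  | cons line rest ih =>
    intro out pb
    simp only [pvALoop, List.map_cons, pvKeep]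
    split_ifs with h
    · rw [ih]
    · rw [ih]; simp

-- the joined paragraphs B's loop produces, on already-rstripped lines
def pvGrp : List (List Char) → List (List Char) → List (List Char)
  | para, [] => if para.isEmpty then [] else [PySem.Chars.join ['\n'] para]
  | para, c :: rest =>
    if c.isEmpty then
      if para.isEmpty then pvGrp [] rest else PySem.Chars.join ['\n'] para :: pvGrp [] rest
    else pvGrp (para ++ [c]) rest

theorem pvBLoop_eq (ls : List (List Char)) :
    ∀ (paragraphs para : List (List Char)),
      pvBLoop ls paragraphs para = paragraphs ++ pvGrp para (ls.map PySem.Chars.rstrip) := by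
  induction ls with
  | nil => intro paragraphs para; simp only [pvBLoop, List.map_nil, pvGrp]; split_ifs <;> simp
  | cons raw rest ih =>
    intro paragraphs para
    simp only [pvBLoop, List.map_cons, pvGrp]
    by_cases hl : (PySem.Chars.rstrip raw).isEmpty
    · simp only [hl, Bool.not_true, Bool.false_eq_true, if_false, if_true]
      by_cases hp : para.isEmpty
      · simp [ih, List.isEmpty_iff.mp hp]
      · simp [hp, ih]
    · simp [hl, ih]

theorem pvGrp_ne_nil (r : List (List Char)) :
    ∀ (para : List (List Char)), ¬ para.isEmpty → pvGrp para r ≠ [] := by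
  induction r with
  | nil => intro para hp; simp [pvGrp, hp]
  | cons c rest ih =>
    intro para hp
    simp only [pvGrp]
    by_cases hc : c.isEmpty
    · simp [hc, hp]
    · rw [if_neg hc]; exact ih (para ++ [c]) (by simp)

theorem pv_join_append (sep : List Char) (xs ys : List (List Char))
    (hx : xs ≠ []) (hy : ys ≠ []) :
    PySem.Chars.join sep (xs ++ ys) =
      PySem.Chars.join sep xs ++ sep ++ PySem.Chars.join sep ys := by
  induction xs with
  | nil => exact absurd rfl hx
  | cons x xs ih =>
    cases xs with
    | nil =>
      cases ys with
      | nil => exact absurd rfl hy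
      | cons y ys => simp [PySem.Chars.join_cons_cons, PySem.Chars.join_singleton]
    | cons x' xs' =>
      have := ih (by simp)
      simp only [List.cons_append, PySem.Chars.join_cons_cons] at this ⊢
      rw [this]; simp

theorem pv_strip_cons_nl (s : List Char) :
    PySem.Chars.strip ('\n' :: s) = PySem.Chars.strip s := by
  simp [PySem.Chars.strip, PySem.Chars.lstrip,
    show PySem.Chars.isspace '\n' = true from by decide]

theorem pv_rstrip_append_nl (s : List Char) :
    PySem.Chars.rstrip (s ++ ['\n']) = PySem.Chars.rstrip s := by
  simp [PySem.Chars.rstrip,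
    show PySem.Chars.isspace '\n' = true from by decide]

theorem pv_strip_append_nl (s : List Char) :
    PySem.Chars.strip (s ++ ['\n']) = PySem.Chars.strip s := by
  simp only [PySem.Chars.strip, PySem.Chars.lstrip, List.dropWhile_append]
  by_cases h : (List.dropWhile PySem.Chars.isspace s).isEmpty
  · simp [show List.dropWhile PySem.Chars.isspace ['\n'] = [] from by decide,
      List.isEmpty_iff.mp h, PySem.Chars.rstrip]
  · simp only [h, Bool.false_eq_true, if_false]
    exact pv_rstrip_append_nl _

-- dropping a leading empty line before join changes nothing after strip
theorem pv_strip_join_nil_cons (K : List (List Char)) :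
    PySem.Chars.strip (PySem.Chars.join ['\n'] ([] :: K)) =
      PySem.Chars.strip (PySem.Chars.join ['\n'] K) := by
  cases K with
  | nil => simp [PySem.Chars.join_singleton, PySem.Chars.join_nil]
  | cons y K' =>
    rw [PySem.Chars.join_cons_cons]
    simp only [List.nil_append]
    exact pv_strip_cons_nl _

-- the starting prev_blank flag is invisible after strip
theorem pv_strip_keep_flag (r : List (List Char)) :
    PySem.Chars.strip (PySem.Chars.join ['\n'] (pvKeep false r)) =
      PySem.Chars.strip (PySem.Chars.join ['\n'] (pvKeep true r)) := by
  cases r with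
  | nil => rfl
  | cons c rest =>
    by_cases hc : c.isEmpty
    · have hce : c = [] := List.isEmpty_iff.mp hc
      simp only [pvKeep, Bool.and_false, Bool.false_eq_true, if_false, hce]
      exact pv_strip_join_nil_cons _
    · simp [pvKeep, hc]

-- core invariant: inside/next-to a nonempty paragraph, A's joined kept lines equal
-- B's "\n\n"-joined paragraphs, up to one trailing '\n'
theorem pv_core (r : List (List Char)) :
    (∀ para : List (List Char), para ≠ [] →
      ∃ t, (t = ([] : List Char) ∨ t = ['\n']) ∧
        PySem.Chars.join ['\n'] (para ++ pvKeep false r) =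
          PySem.Chars.join ['\n', '\n'] (pvGrp para r) ++ t) ∧
    (∀ para : List (List Char), para ≠ [] →
      ∃ t, (t = ([] : List Char) ∨ t = ['\n']) ∧
        PySem.Chars.join ['\n'] (para ++ [[]] ++ pvKeep true r) =
          PySem.Chars.join ['\n', '\n'] (PySem.Chars.join ['\n'] para :: pvGrp [] r) ++ t) := by
  induction r with
  | nil =>
    constructor
    · intro para hp
      refine ⟨[], Or.inl rfl, ?_⟩
      simp [pvKeep, pvGrp, List.isEmpty_iff, hp, PySem.Chars.join_singleton]
    · intro para hp
      refine ⟨['\n'], Or.inr rfl, ?_⟩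
      simp only [pvKeep, List.append_nil, pvGrp]
      rw [pv_join_append ['\n'] para [[]] hp (by simp)]
      simp [PySem.Chars.join_singleton]
  | cons c rest ih =>
    obtain ⟨ih1, ih2⟩ := ih
    constructor
    · intro para hp
      by_cases hc : c.isEmpty
      · have hce : c = [] := List.isEmpty_iff.mp hc
        simp only [pvKeep, Bool.and_false, Bool.false_eq_true, if_false, pvGrp,
          List.isEmpty_iff, hp, hce]
        obtain ⟨t, ht, he⟩ := ih2 para hp
        refine ⟨t, ht, ?_⟩
        simpa using he
      · simp only [pvKeep, hc, Bool.false_and, Bool.false_eq_true, if_false, pvGrp]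
        obtain ⟨t, ht, he⟩ := ih1 (para ++ [c]) (by simp)
        refine ⟨t, ht, ?_⟩
        simpa using he
    · intro para hp
      by_cases hc : c.isEmpty
      · simp only [pvKeep, hc, Bool.and_true, if_true, pvGrp, List.isEmpty_iff.mpr rfl, if_true]
        exact ih2 para hp
      · simp only [pvKeep, hc, Bool.false_and, Bool.false_eq_true, if_false, pvGrp,
          List.isEmpty_iff.mpr rfl, if_true, List.nil_append]
        obtain ⟨t, ht, he⟩ := ih1 [c] (by simp)
        refine ⟨t, ht, ?_⟩
        have hgr : pvGrp [c] rest ≠ [] := pvGrp_ne_nil rest [c] (by simp)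
        have lhs :
            PySem.Chars.join ['\n'] (para ++ [[]] ++ c :: pvKeep false rest) =
              PySem.Chars.join ['\n'] para ++ ['\n', '\n'] ++
                PySem.Chars.join ['\n'] ([c] ++ pvKeep false rest) := by
          rw [List.append_assoc, pv_join_append ['\n'] para ([[]] ++ c :: pvKeep false rest)
            hp (by simp)]
          simp [PySem.Chars.join_cons_cons]
        rw [lhs, he]
        cases hg : pvGrp [c] rest with
        | nil => exact absurd hg hgr
        | cons g gs =>
          rw [PySem.Chars.join_cons_cons]
          simp
  
-- the whole-string equality before String.ofList
theorem pv_main (rls : List (List Char)) :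
    PySem.Chars.strip (PySem.Chars.join ['\n'] (pvKeep false rls)) =
      PySem.Chars.strip (PySem.Chars.join ['\n', '\n'] (pvGrp [] rls)) := by
  induction rls with
  | nil => rfl
  | cons c r ih =>
    by_cases hc : c.isEmpty
    · have hce : c = [] := List.isEmpty_iff.mp hc
      simp only [pvKeep, Bool.and_false, Bool.false_eq_true, if_false, hce, pvGrp,
        List.isEmpty_iff.mpr rfl, if_true]
      rw [pv_strip_join_nil_cons, ← pv_strip_keep_flag, ih]
    · simp only [pvKeep, hc, Bool.false_and, Bool.false_eq_true, if_false, pvGrp,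
        List.isEmpty_iff.mpr rfl, if_true]
      obtain ⟨t, ht, he⟩ := (pv_core r).1 [c] (by simp)
      have hj : PySem.Chars.join ['\n'] (c :: pvKeep false r) =
          PySem.Chars.join ['\n', '\n'] (pvGrp [c] r) ++ t := by simpa using he
      rw [List.nil_append, hj]
      rcases ht with h | h <;> rw [h]
      · simp
      · exact pv_strip_append_nl _

-- ===== VERDICT (by name: the statement is the Claim_ definition above) =====
theorem clean_lyrics_py_spec : Claim_equal_clean_lyrics_py := by
  unfold Claim_equal_clean_lyrics_py Spec_clean_lyrics_py
  intro text _
  unfold clean_lyrics_py clean_lyrics_py_alt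
  split_ifs with h
  · rfl
  · dsimp only
    rw [pvALoop_eq, pvBLoop_eq]
    simp only [List.nil_append]
    rw [pv_main]
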